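-- pv_equiv track=rewrite | github.com/kakao/pycon2016apac-gawibawibo | 0814/player_qkraudghgh.py | show_me_the_hand
-- ===== SOURCE A (Python) =====
-- def show_me_the_hand(records):
-- 	tempNumber = 0
-- 	for record in records:
-- 		if record[1] == 'gawi':
-- 			tempNumber += 1
-- 		elif record[1] == 'bawi':
-- 			tempNumber += 2
-- 		else:
-- 			tempNumber += 3
--
-- 	if tempNumber % 3 == 0:
-- 		return 'gawi'
-- 	elif tempNumber % 3 == 1:
-- 		return 'bawi'
-- 	else:
-- 		return 'bo'
-- ===== SOURCE B (Python) =====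
-- NEXT = {'gawi': 'bawi', 'bawi': 'bo', 'bo': 'gawi'}
--
-- def show_me_the_hand(records):
--     # Symbolic state machine: rotate the current hand around the 3-cycle
--     # gawi -> bawi -> bo -> gawi; 'gawi' rotates once, 'bawi' twice,
--     # anything else three times (= identity, so no rotation needed).
--     hand = 'gawi'
--     for record in records:
--         label = record[1]
--         if label == 'gawi':
--             hand = NEXT[hand]
--         elif label == 'bawi':
--             hand = NEXT[NEXT[hand]]
--     return hand
-- ===== Notes on version B (the rewrite author's own statement) =====
-- stated objective: alternative
-- what changed: Replaces the integer weighted-sum accumulator and final mod-3 if/elif decoding by a purely symbolic state machine: the current hand string is rotated around the cycle gawi->bawi->bo (once per 'gawi' record, twice per 'bawi', not at all otherwise), so no arithmetic or mod is performed at all.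
import Mathlib
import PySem

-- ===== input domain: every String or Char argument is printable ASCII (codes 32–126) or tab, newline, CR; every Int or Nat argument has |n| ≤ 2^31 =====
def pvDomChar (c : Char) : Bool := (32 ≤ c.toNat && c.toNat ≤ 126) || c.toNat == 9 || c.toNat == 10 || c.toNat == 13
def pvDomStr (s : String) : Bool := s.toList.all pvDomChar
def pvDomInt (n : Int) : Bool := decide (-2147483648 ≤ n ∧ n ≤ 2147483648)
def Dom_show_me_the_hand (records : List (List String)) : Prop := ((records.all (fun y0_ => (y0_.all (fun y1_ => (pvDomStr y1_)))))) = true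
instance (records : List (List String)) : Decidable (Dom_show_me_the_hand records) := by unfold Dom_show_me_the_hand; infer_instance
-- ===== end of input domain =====

-- B replaces A's integer weighted-sum accumulator + final mod-3 if/elif decoding by a
-- purely symbolic state machine that rotates the current hand around the cycle
-- gawi -> bawi -> bo (no arithmetic at all); objective: alternative.


-- ===== PORT A =====
-- literal port: running Int accumulator over the records, then an if/elif chain on tempNumber % 3
def show_me_the_hand (records : List (List String)) : String :=
  let tempNumber : Int := records.foldl (fun tempNumber record =>
    if (PySem.List.pyGet? record 1).getD "" == "gawi" then tempNumber + 1
    else if (PySem.List.pyGet? record 1).getD "" == "bawi" then tempNumber + 2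
    else tempNumber + 3) 0
  if PySem.Int.mod tempNumber 3 == 0 then "gawi"
  else if PySem.Int.mod tempNumber 3 == 1 then "bawi"
  else "bo"

-- ===== PORT B =====
-- the NEXT rotation dict of Source B
def pvNEXT : PySem.Dict String String :=
  PySem.Dict.ofList [("gawi", "bawi"), ("bawi", "bo"), ("bo", "gawi")]

-- port of Source B: symbolic state machine; hand is rotated via NEXT (lookup total on the
-- reachable states, so getD "" is exact)
def show_me_the_hand_alt (records : List (List String)) : String :=
  records.foldl (fun hand record =>
    let label := (PySem.List.pyGet? record 1).getD ""
    if label == "gawi" then (PySem.Dict.get? pvNEXT hand).getD ""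
    else if label == "bawi" then
      (PySem.Dict.get? pvNEXT ((PySem.Dict.get? pvNEXT hand).getD "")).getD ""
    else hand) "gawi"

-- ===== PRECONDITION & SPEC =====
-- Pre_ excludes exactly the inputs on which A raises IndexError: a record with fewer than 2 entries.
def Pre_show_me_the_hand (records : List (List String)) : Prop :=
  ∀ r ∈ records, 2 ≤ r.length
instance (records : List (List String)) : Decidable (Pre_show_me_the_hand records) := by
  unfold Pre_show_me_the_hand; infer_instance
def pvWitness_show_me_the_hand : List (List String) := [["p", "gawi"], ["q", "bo"]]

def Spec_show_me_the_hand (records : List (List String)) (out : String) : Prop := out = show_me_the_hand_alt records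
instance (records : List (List String)) (out : String) : Decidable (Spec_show_me_the_hand records out) := by unfold Spec_show_me_the_hand; infer_instance

-- ===== CLAIM (what is proved, stated in full; the proofs are below) =====
def Claim_equal_show_me_the_hand : Prop := ∀ (records : List (List String)), Dom_show_me_the_hand records → Pre_show_me_the_hand records → Spec_show_me_the_hand records (show_me_the_hand records)

-- ===== LEMMAS AND PROOFS =====

-- decode A's accumulator into the hand it will finally print
def pvDecode (t : Int) : String :=
  if PySem.Int.mod t 3 == 0 then "gawi"
  else if PySem.Int.mod t 3 == 1 then "bawi"
  else "bo"

lemma decode_succ (t : Int) :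
    pvDecode (t + 1) = (PySem.Dict.get? pvNEXT (pvDecode t)).getD "" := by
  unfold pvDecode
  rw [PySem.Int.mod_eq_emod_of_pos (by norm_num), PySem.Int.mod_eq_emod_of_pos (by norm_num)]
  have h : t % 3 = 0 ∨ t % 3 = 1 ∨ t % 3 = 2 := by omega
  rcases h with h | h | h <;> simp [h, show (t + 1) % 3 = (t % 3 + 1) % 3 by omega, pvNEXT] <;>
    rfl

lemma decode_two (t : Int) :
    pvDecode (t + 2)
      = (PySem.Dict.get? pvNEXT ((PySem.Dict.get? pvNEXT (pvDecode t)).getD "")).getD "" := by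
  rw [← decode_succ, ← decode_succ]; ring_nf

lemma decode_three (t : Int) : pvDecode (t + 3) = pvDecode t := by
  unfold pvDecode
  rw [PySem.Int.mod_eq_emod_of_pos (by norm_num), PySem.Int.mod_eq_emod_of_pos (by norm_num)]
  rw [show (t + 3) % 3 = t % 3 by omega]

-- invariant: B's fold started from the decoded accumulator tracks A's fold
lemma fold_inv (records : List (List String)) (acc : Int) :
    records.foldl (fun hand record =>
      let label := (PySem.List.pyGet? record 1).getD ""
      if label == "gawi" then (PySem.Dict.get? pvNEXT hand).getD ""
      else if label == "bawi" then
        (PySem.Dict.get? pvNEXT ((PySem.Dict.get? pvNEXT hand).getD "")).getD ""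
      else hand) (pvDecode acc)
    = pvDecode (records.foldl (fun tempNumber record =>
        if (PySem.List.pyGet? record 1).getD "" == "gawi" then tempNumber + 1
        else if (PySem.List.pyGet? record 1).getD "" == "bawi" then tempNumber + 2
        else tempNumber + 3) acc) := by
  induction records generalizing acc with
  | nil => rfl
  | cons r rs ih =>
    have hstep :
        (let label := (PySem.List.pyGet? r 1).getD ""
         if label == "gawi" then (PySem.Dict.get? pvNEXT (pvDecode acc)).getD ""
         else if label == "bawi" then
           (PySem.Dict.get? pvNEXT ((PySem.Dict.get? pvNEXT (pvDecode acc)).getD "")).getD ""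
         else pvDecode acc)
        = pvDecode (if (PySem.List.pyGet? r 1).getD "" == "gawi" then acc + 1
            else if (PySem.List.pyGet? r 1).getD "" == "bawi" then acc + 2 else acc + 3) := by
      by_cases h1 : (PySem.List.pyGet? r 1).getD "" = "gawi" <;>
        by_cases h2 : (PySem.List.pyGet? r 1).getD "" = "bawi" <;>
          simp [h1, h2, decode_succ, decode_two, decode_three]
    rw [List.foldl_cons, List.foldl_cons, hstep]
    exact ih _

-- ===== VERDICT (by name: the statement is the Claim_ definition above) =====
theorem show_me_the_hand_spec : Claim_equal_show_me_the_hand := by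
  intro records _ _
  unfold Spec_show_me_the_hand show_me_the_hand show_me_the_hand_alt
  have h := fold_inv records 0
  have h0 : pvDecode 0 = "gawi" := rfl
  rw [h0] at h
  rw [h]
  rfl
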